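-- pv_equiv track=rewrite | github.com/ImranParthiib/Python-Odyssey | Codeforces/turtleMath.py | turtle_math
-- ===== SOURCE A (Python) =====
-- def is_divisible_by_3(arr):
--     total_sum = sum(arr)
--     if total_sum % 3 == 0:
--         return True
--
--     for i in range(len(arr)):
--         temp_arr = arr[:i] + arr[i+1:]
--         if sum(temp_arr) % 3 == 0:
--             return True
--
--     return False
--
-- def turtle_math(new_f_x):
--     sum_x = sum(new_f_x)
--
--     if len(new_f_x) == 0:
--         return 0
--
--     elif sum_x % 3 == 0:
--         return 0
--
--     elif (sum_x + 1) % 3 == 0: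
--         return 1
--
--     count = 0
--
--     while len(new_f_x):
--         if is_divisible_by_3(new_f_x):
--             count += 1
--             return count
--         new_f_x.pop()
--         count += 1
--         sum_x = sum(new_f_x)
--         if sum_x % 3 == 0:
--             return count
--         elif (sum_x + 1) % 3 == 0:
--             count += 1
--             return count
--
--     return count
-- ===== SOURCE B (Python) =====
-- def turtle_math(new_f_x):
--     r = sum(new_f_x) % 3
--     if not new_f_x or r == 0:
--         return 0
--     if r == 2:
--         return 1
--     if any(x % 3 == 1 for x in new_f_x):
--         return 1
--     k = 0
--     for x in reversed(new_f_x):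
--         if x % 3 != 0:
--             break
--         k += 1
--     return k + 2
-- ===== Notes on version B (the rewrite author's own statement) =====
-- stated objective: simpler
-- what changed: Replaces the pop-and-retry simulation with per-index removal-candidate rebuilding by direct residue arithmetic: the answer is read off sum mod 3, one scan for a residue-1 element, and one backward scan counting trailing multiples of 3.
import Mathlib
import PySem

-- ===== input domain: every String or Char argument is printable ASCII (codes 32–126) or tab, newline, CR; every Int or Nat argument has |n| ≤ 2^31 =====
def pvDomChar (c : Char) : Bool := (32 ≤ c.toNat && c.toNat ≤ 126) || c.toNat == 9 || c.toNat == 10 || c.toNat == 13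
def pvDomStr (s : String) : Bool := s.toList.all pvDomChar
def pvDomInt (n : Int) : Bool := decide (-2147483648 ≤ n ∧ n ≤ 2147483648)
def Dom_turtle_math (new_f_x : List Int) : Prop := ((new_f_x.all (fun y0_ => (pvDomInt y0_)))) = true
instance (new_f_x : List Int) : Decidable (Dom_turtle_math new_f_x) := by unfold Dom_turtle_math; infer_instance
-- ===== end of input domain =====

-- B replaces A's pop-and-retry simulation by direct residue arithmetic (simpler).
-- NOTE: Python A mutates its argument (pops elements) on one branch; B does not.
-- The equivalence proved here is about the RETURN value only.

-- ===== PORT A =====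
-- '%' below is Int.emod, which agrees with Python '%' since the divisor 3 is positive.
def is_divisible_by_3 (arr : List Int) : Bool :=
  if arr.sum % 3 = 0 then true
  else (List.range arr.length).any
    (fun i => (arr.take i ++ arr.drop (i+1)).sum % 3 = 0)

-- the 'while len(new_f_x)' loop of A; '.pop()' removes the last element = dropLast
def turtle_loop (l : List Int) (count : Int) : Int :=
  if h : l = [] then count
  else if is_divisible_by_3 l then count + 1
  else
    let l' := l.dropLast
    let c := count + 1
    let s := l'.sum
    if s % 3 = 0 then c
    else if (s + 1) % 3 = 0 then c + 1
    else turtle_loop l' c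
termination_by l.length
decreasing_by
  have := List.length_pos_of_ne_nil h
  simp [List.length_dropLast]; omega

def turtle_math (new_f_x : List Int) : Int :=
  let sum_x := new_f_x.sum
  if new_f_x.length = 0 then 0
  else if sum_x % 3 = 0 then 0
  else if (sum_x + 1) % 3 = 0 then 1
  else turtle_loop new_f_x 0

-- ===== PORT B =====
-- the 'for x in reversed(...)' counting loop of B (it breaks at the first non-multiple of 3)
def trail3 : List Int → Int
  | [] => 0
  | x :: xs => if x % 3 ≠ 0 then 0 else 1 + trail3 xs

def turtle_math_alt (new_f_x : List Int) : Int :=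
  let r := new_f_x.sum % 3
  if new_f_x.isEmpty || r = 0 then 0
  else if r = 2 then 1
  else if new_f_x.any (fun x => x % 3 = 1) then 1
  else trail3 new_f_x.reverse + 2

-- ===== PRECONDITION & SPEC =====
def Spec_turtle_math (new_f_x : List Int) (out : Int) : Prop := out = turtle_math_alt new_f_x
instance (new_f_x : List Int) (out : Int) : Decidable (Spec_turtle_math new_f_x out) := by unfold Spec_turtle_math; infer_instance

-- ===== CLAIM (what is proved, stated in full; the proofs are below) =====
def Claim_equal_turtle_math : Prop := ∀ (new_f_x : List Int), Dom_turtle_math new_f_x → Spec_turtle_math new_f_x (turtle_math new_f_x)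

-- ===== LEMMAS AND PROOFS =====

-- removing index i from l subtracts l[i] from the sum
lemma remove_sum (l : List Int) (i : Nat) (h : i < l.length) :
    (l.take i ++ l.drop (i+1)).sum = l.sum - l[i] := by
  have key : l.sum = (l.take i ++ l[i] :: l.drop (i+1)).sum := by
    conv_lhs => rw [← List.take_append_drop i l, List.drop_eq_getElem_cons h]
  rw [List.sum_append] at key ⊢
  rw [List.sum_cons] at key
  omega

lemma isDiv3_false (l : List Int) (h1 : l.sum % 3 = 1)
    (h2 : ∀ x ∈ l, x % 3 ≠ 1) : is_divisible_by_3 l = false := by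
  unfold is_divisible_by_3
  rw [if_neg (by omega)]
  simp only [List.any_eq_false, List.mem_range, decide_eq_true_eq]
  intro i hi
  rw [remove_sum l i hi]
  have hx := h2 l[i] (l.getElem_mem hi)
  have : l[i] % 3 = 0 ∨ l[i] % 3 = 2 := by omega
  omega

lemma isDiv3_true (l : List Int) (h1 : l.sum % 3 = 1)
    (h2 : ∃ x ∈ l, x % 3 = 1) : is_divisible_by_3 l = true := by
  unfold is_divisible_by_3
  rw [if_neg (by omega)]
  obtain ⟨x, hx, hx1⟩ := h2
  obtain ⟨i, hi, rfl⟩ := List.mem_iff_getElem.mp hx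
  simp only [List.any_eq_true, List.mem_range, decide_eq_true_eq]
  exact ⟨i, hi, by rw [remove_sum l i hi]; omega⟩

-- the heart of the equivalence: in the residue-1, no-residue-1-element case,
-- A's loop pops trailing multiples of 3 and then two more steps
lemma turtle_loop_no_one (l : List Int) (h1 : l.sum % 3 = 1)
    (h2 : ∀ x ∈ l, x % 3 ≠ 1) (c : Int) :
    turtle_loop l c = c + trail3 l.reverse + 2 := by
  induction l using List.reverseRecOn generalizing c with
  | nil => simp at h1
  | append_singleton l' a ih =>
    have hne : l' ++ [a] ≠ [] := by simp
    rw [turtle_loop, dif_neg hne,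
        if_neg (by rw [isDiv3_false _ h1 h2]; simp)]
    have hs : (l' ++ [a]).sum = l'.sum + a := by simp
    have ha : a % 3 ≠ 1 := h2 a (by simp)
    have ha' : a % 3 = 0 ∨ a % 3 = 2 := by omega
    simp only [List.dropLast_concat]
    rcases ha' with ha0 | ha2
    · -- popped a multiple of 3: sum stays ≡ 1, loop continues
      have hs1 : l'.sum % 3 = 1 := by omega
      rw [if_neg (by omega), if_neg (by omega),
          ih hs1 (fun x hx => h2 x (by simp [hx])) (c + 1)]
      have : trail3 (l' ++ [a]).reverse = 1 + trail3 l'.reverse := by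
        rw [List.reverse_append]; simp [trail3, ha0]
      rw [this]; ring
    · -- popped a residue-2 element: sum ≡ 2, A returns after one more count
      have hs2 : l'.sum % 3 = 2 := by omega
      rw [if_neg (by omega), if_pos (by omega)]
      have : trail3 (l' ++ [a]).reverse = 0 := by
        rw [List.reverse_append]; simp [trail3, ha2]
      rw [this]; ring

-- ===== VERDICT (by name: the statement is the Claim_ definition above) =====
theorem turtle_math_spec : Claim_equal_turtle_math := by
  intro l _
  unfold Spec_turtle_math turtle_math turtle_math_alt
  rcases eq_or_ne l [] with rfl | hne
  · simp
  · have hlen : l.length ≠ 0 := by simpa using hne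
    have hres : l.sum % 3 = 0 ∨ l.sum % 3 = 1 ∨ l.sum % 3 = 2 := by omega
    simp only [if_neg hlen]
    rcases hres with h0 | h1 | h2
    · simp [h0]
    · -- sum ≡ 1: A enters its while loop
      rw [if_neg (by omega), if_neg (by omega),
          if_neg (by simp [List.isEmpty_iff, hne]; omega), if_neg (by omega)]
      by_cases hx : ∃ x ∈ l, x % 3 = 1
      · rw [if_pos (by simpa using hx), turtle_loop, dif_neg hne,
            if_pos (by rw [isDiv3_true l h1 hx])]
        norm_num
      · have hno : ∀ x ∈ l, x % 3 ≠ 1 := by push Not at hx; exact hx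
        rw [if_neg (by simpa using hx), turtle_loop_no_one l h1 hno 0]
        ring
    · rw [if_neg (by omega), if_pos (by omega),
          if_neg (by simp [List.isEmpty_iff, hne]; omega), if_pos (by omega)]
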